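-- pv_equiv track=rewrite | github.com/akshatg20/sql-parser | execute.py | index_graduation_year
-- ===== SOURCE A (Python) =====
-- def index_graduation_year(years_with_ids):
-- 	"""
-- 	Sorts the graduation years and returns two things:
-- 	1. A list of student IDs sorted by graduation year.
-- 	2. A dictionary where the keys are unique graduation years and the values are the start index of the corresponding year in the sorted list.
--
-- 	This method can be used to create an index on graduation year for a list of students.
--
-- 	:param years_with_ids: List of tuples in the form ( student_id, graduation_year)
-- 	:return: sorted_ids, year_start_index
-- 	"""
--
-- 	# Sort the list of tuples based on the graduation year (second element of the tuple)
-- 	sorted_years_with_ids = sorted(years_with_ids, key=lambda x: x[1])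
--
-- 	# Extract the sorted IDs
-- 	sorted_ids = [item[0] for item in sorted_years_with_ids]
--
-- 	year_start_index = {}
-- 	for i, (_, year) in enumerate(sorted_years_with_ids):
-- 		if year not in year_start_index:
-- 			year_start_index[year] = (i, i)  # Record the first occurrence of the graduation year as (first_index, last_index)
-- 		else:
-- 			year_start_index[year] = (year_start_index[year][0], i)  # Update the last occurrence of the graduation year
--
-- 	return sorted_ids, year_start_index
-- ===== SOURCE B (Python) =====
-- def index_graduation_year(years_with_ids):
--     # Bucket ids by year (original order preserved), then emit buckets in
--     # ascending year order; only the distinct years are ever sorted.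
--     buckets = {}
--     for student_id, year in years_with_ids:
--         buckets.setdefault(year, []).append(student_id)
--     sorted_ids = []
--     year_start_index = {}
--     pos = 0
--     for year in sorted(buckets):
--         ids = buckets[year]
--         year_start_index[year] = (pos, pos + len(ids) - 1)
--         sorted_ids += ids
--         pos += len(ids)
--     return sorted_ids, year_start_index
-- ===== Notes on version B (the rewrite author's own statement) =====
-- stated objective: alternative
-- what changed: Replaces sorting the whole pair list with a bucket-sort scheme: one pass groups ids per year into a dict of buckets, only the distinct years are sorted, and the output list and (first,last) index ranges are emitted bucket by bucket with a running offset.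
import Mathlib
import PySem

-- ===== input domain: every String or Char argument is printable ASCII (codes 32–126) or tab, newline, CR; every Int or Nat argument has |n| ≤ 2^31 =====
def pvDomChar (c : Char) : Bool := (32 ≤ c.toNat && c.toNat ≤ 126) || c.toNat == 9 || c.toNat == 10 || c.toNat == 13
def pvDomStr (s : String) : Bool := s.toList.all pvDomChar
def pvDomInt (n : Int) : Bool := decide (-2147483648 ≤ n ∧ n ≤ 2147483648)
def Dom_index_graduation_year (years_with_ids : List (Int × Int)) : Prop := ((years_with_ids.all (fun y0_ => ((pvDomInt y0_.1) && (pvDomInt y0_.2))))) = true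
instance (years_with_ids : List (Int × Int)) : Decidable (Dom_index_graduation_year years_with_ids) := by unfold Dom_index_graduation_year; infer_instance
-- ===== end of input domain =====

-- B avoids sorting the pair list: it groups ids into per-year buckets in one pass, sorts only the
-- distinct years, and emits buckets with a running offset (objective: alternative algorithm).

-- ===== PORT A =====
-- the dict-update step of A's loop body ('if year not in …': get? = none ⟺ not in)
def pvStepA (d : PySem.Dict Int (Int × Int)) (p : Int × (Int × Int)) : PySem.Dict Int (Int × Int) :=
  match d.get? p.2.2 with
  | none => d.insert p.2.2 (p.1, p.1)
  | some q => d.insert p.2.2 (q.1, p.1)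

def index_graduation_year (years_with_ids : List (Int × Int)) : List Int × (List (Int × Int × Int)) :=
  let sorted_years_with_ids := PySem.List.sorted years_with_ids (fun x => x.2)
  let sorted_ids := sorted_years_with_ids.map (fun item => item.1)
  let year_start_index :=
    (PySem.List.enumerate sorted_years_with_ids 0).foldl pvStepA PySem.Dict.empty
  (sorted_ids, year_start_index.items)

-- ===== PORT B =====
-- Source B's 'buckets.setdefault(year, []).append(student_id)' is exactly Dict.modify year [] (· ++ [id])
def index_graduation_year_alt (years_with_ids : List (Int × Int)) : List Int × (List (Int × Int × Int)) :=
  let buckets : PySem.Dict Int (List Int) :=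
    years_with_ids.foldl (fun d p => d.modify p.2 [] (fun v => v ++ [p.1])) PySem.Dict.empty
  -- 'for year in sorted(buckets)' with the three loop accumulators (sorted_ids, year_start_index, pos);
  -- 'buckets[year]' ported as getD (the key is always present, so it is exact)
  let r := (PySem.List.sorted buckets.keys (fun x => x) false).foldl
    (fun (acc : List Int × PySem.Dict Int (Int × Int) × Int) (year : Int) =>
      let ids := buckets.getD year []
      (acc.1 ++ ids,
       acc.2.1.insert year (acc.2.2, acc.2.2 + ids.length - 1),
       acc.2.2 + ids.length))
    ([], PySem.Dict.empty, 0)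
  (r.1, r.2.1.items)

-- ===== PRECONDITION & SPEC =====
def Spec_index_graduation_year (years_with_ids : List (Int × Int)) (out : List Int × (List (Int × Int × Int))) : Prop := out = index_graduation_year_alt years_with_ids
instance (years_with_ids : List (Int × Int)) (out : List Int × (List (Int × Int × Int))) : Decidable (Spec_index_graduation_year years_with_ids out) := by unfold Spec_index_graduation_year; infer_instance

-- ===== CLAIM (what is proved, stated in full; the proofs are below) =====
def Claim_equal_index_graduation_year : Prop := ∀ (years_with_ids : List (Int × Int)), Dom_index_graduation_year years_with_ids → Spec_index_graduation_year years_with_ids (index_graduation_year years_with_ids)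

-- ===== LEMMAS AND PROOFS =====

-- the (year, first, last) entries produced for the year list ys when year y covers n y slots from offset i
def pvSpine : List Int → (Int → Nat) → Int → List (Int × Int × Int)
  | [], _, _ => []
  | y :: ys, n, i => (y, i, i + (n y : Int) - 1) :: pvSpine ys n (i + (n y : Int))

theorem pvSpine_congr : ∀ (ys : List Int) (n m : Int → Nat) (i : Int),
    (∀ y ∈ ys, n y = m y) → pvSpine ys n i = pvSpine ys m i := by
  intro ys
  induction ys with
  | nil => intros; rfl
  | cons y t ih =>
      intro n m i h
      simp only [pvSpine, h y (by simp)]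
      rw [ih n m _ (fun z hz => h z (by simp [hz]))]

-- STABILITY of PySem's sort: inserting x into a key-sorted list does not disturb the
-- per-key filters except by appending x to its own key's filter
theorem pvFilter_insertBy (y : Int) (x : Int × Int) :
    ∀ (s : List (Int × Int)), s.Pairwise (fun a b => a.2 ≤ b.2) →
    (PySem.List.insertBy (fun a b => decide (a.2 < b.2)) x s).filter (fun p => p.2 == y)
      = s.filter (fun p => p.2 == y) ++ (if x.2 == y then [x] else []) := by
  intro s
  induction s with
  | nil => intro _; by_cases hxy : x.2 = y <;> simp [PySem.List.insertBy, hxy]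
  | cons b t ih =>
      intro hp
      have hbt := List.pairwise_cons.mp hp
      simp only [PySem.List.insertBy]
      by_cases hlt : x.2 < b.2
      · simp only [decide_eq_true_eq, if_pos hlt]
        by_cases hxy : x.2 = y
        · -- every element of b :: t has key ≥ b.2 > x.2 = y, so the old filter is empty
          have hnil : (b :: t).filter (fun p => p.2 == y) = [] := by
            rw [List.filter_eq_nil_iff]
            intro p hpmem
            rcases List.mem_cons.mp hpmem with h | h
            · subst h; simp only [beq_iff_eq]; omega
            · have := hbt.1 p h; simp only [beq_iff_eq]; omega
          simp [hnil, hxy]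
        · simp [List.filter_cons, hxy]
      · simp only [decide_eq_true_eq, if_neg hlt]
        rw [List.filter_cons, List.filter_cons, ih hbt.2]
        split <;> simp

theorem pvSorted_filter (l : List (Int × Int)) (y : Int) :
    (PySem.List.sorted l (fun x => x.2) false).filter (fun p => p.2 == y)
      = l.filter (fun p => p.2 == y) := by
  induction l using List.reverseRecOn with
  | nil => rfl
  | append_singleton t x ih =>
      rw [PySem.List.sorted_eq_foldl_insertBy, List.foldl_append, List.foldl_cons, List.foldl_nil,
        ← PySem.List.sorted_eq_foldl_insertBy,
        pvFilter_insertBy y x _ (PySem.List.sorted_pairwise t (fun p => p.2)), ih,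
        List.filter_append]
      by_cases h : x.2 = y <;> simp [h]

-- a key-sorted list is the concatenation of its per-key filters over any strictly
-- increasing key list covering it
theorem pvDecomp : ∀ (ys : List Int), ys.Pairwise (· < ·) →
    ∀ (s : List (Int × Int)), s.Pairwise (fun a b => a.2 ≤ b.2) →
    (∀ p ∈ s, p.2 ∈ ys) →
    s = ys.flatMap (fun y => s.filter (fun p => p.2 == y)) := by
  intro ys
  induction ys with
  | nil =>
      intro _ s _ hsub
      rcases s with _ | ⟨p, t⟩
      · rfl
      · exact absurd (hsub p (by simp)) (by simp)
  | cons y ys' ih =>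
      intro hys s hs hsub
      have hys' := List.pairwise_cons.mp hys
      set blk := s.takeWhile (fun p => p.2 == y) with hblk
      set rest := s.dropWhile (fun p => p.2 == y) with hrest
      have hsplit : s = blk ++ rest := (List.takeWhile_append_dropWhile).symm
      have hblk_all : ∀ p ∈ blk, p.2 = y := by
        intro p hp; simpa using List.mem_takeWhile_imp hp
      have hrest_pair : rest.Pairwise (fun a b => a.2 ≤ b.2) :=
        hs.sublist (List.dropWhile_sublist _)
      -- no element of rest has key y
      have hrest_ne : ∀ p ∈ rest, p.2 ≠ y := by
        rcases h : rest with _ | ⟨r0, rt⟩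
        · intro p hp; simp at hp
        · have hr0 : ¬ (r0.2 == y) = true := by
            have := List.head?_dropWhile_not (fun p : Int × Int => p.2 == y) s
            rw [← hrest, h] at this; simpa using this
          have hr0' : r0.2 ≠ y := by simpa using hr0
          have hr0y : y < r0.2 := by
            have hmem : r0 ∈ s := (List.dropWhile_sublist _).mem (by rw [← hrest, h]; simp)
            have := hsub r0 hmem
            rcases List.mem_cons.mp this with h1 | h1
            · omega
            · exact hys'.1 _ h1
          intro p hp
          rcases List.mem_cons.mp hp with h1 | h1
          · rw [h1]; exact hr0'
          · have : r0.2 ≤ p.2 := by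
              have hpw : (r0 :: rt).Pairwise (fun a b => a.2 ≤ b.2) := by
                rw [← h]; exact hrest_pair
              exact (List.pairwise_cons.mp hpw).1 p h1
            omega
      have hblk_filter : s.filter (fun p => p.2 == y) = blk := by
        rw [hsplit, List.filter_append]
        have h1 : blk.filter (fun p => p.2 == y) = blk :=
          List.filter_eq_self.mpr (fun p hp => by simpa using hblk_all p hp)
        have h2 : rest.filter (fun p => p.2 == y) = [] :=
          List.filter_eq_nil_iff.mpr (fun p hp => by simpa using hrest_ne p hp)
        rw [h1, h2, List.append_nil]
      have hrest_sub : ∀ p ∈ rest, p.2 ∈ ys' := by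
        intro p hp
        have : p.2 ∈ y :: ys' := hsub p ((List.dropWhile_sublist _).mem hp)
        rcases List.mem_cons.mp this with h1 | h1
        · exact absurd h1 (hrest_ne p hp)
        · exact h1
      have hrec := ih hys'.2 rest hrest_pair hrest_sub
      have hfilters : ∀ y' ∈ ys', s.filter (fun p => p.2 == y') = rest.filter (fun p => p.2 == y') := by
        intro y' hy'
        have hyy' : y ≠ y' := by have := hys'.1 y' hy'; omega
        rw [hsplit, List.filter_append]
        have : blk.filter (fun p => p.2 == y') = [] :=
          List.filter_eq_nil_iff.mpr (fun p hp => by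
            have := hblk_all p hp; simp [this]; omega)
        rw [this, List.nil_append]
      calc s = blk ++ rest := hsplit
    _ = s.filter (fun p => p.2 == y) ++ ys'.flatMap (fun y' => rest.filter (fun p => p.2 == y')) := by
          rw [hblk_filter, ← hrec]
    _ = (y :: ys').flatMap (fun y' => s.filter (fun p => p.2 == y')) := by
          rw [List.flatMap_cons]
          congr 1
          exact List.flatMap_congr (fun y' hy' => (hfilters y' hy').symm)

-- folding A's step over a run all of whose years equal y, with (a, b) already stored at y
theorem pvFoldlRun (y a : Int) :
    ∀ (r : List (Int × Int)) (j : Int) (d : PySem.Dict Int (Int × Int)) (b : Int),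
    (∀ p ∈ r, p.2 = y) → d.get? y = some (a, b) →
    (PySem.List.enumerate r j).foldl pvStepA d =
      if r.isEmpty then d else d.insert y (a, j + r.length - 1) := by
  intro r
  induction r with
  | nil => intro j d _ _ _; simp [PySem.List.enumerate_nil]
  | cons p r' ih =>
      intro j d b hall hget
      have hy : p.2 = y := hall p (by simp)
      simp only [PySem.List.enumerate_cons, List.foldl_cons, List.isEmpty_cons, if_neg Bool.false_ne_true]
      have hstep : pvStepA d (j, p) = d.insert y (a, j) := by
        simp [pvStepA, hy, hget]
      rw [hstep, ih (j + 1) _ j (fun q hq => hall q (by simp [hq])) (PySem.Dict.get?_insert_self _ _ _)]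
      rcases r' with _ | ⟨q, r''⟩
      · simp
      · simp only [List.isEmpty_cons, if_neg Bool.false_ne_true,
          PySem.Dict.insert_insert_self, List.length_cons]
        congr 2
        push_cast
        ring

-- A's index fold produces exactly the spine of per-year block lengths
theorem pvFoldlSpine : ∀ (ys : List Int), ys.Pairwise (· < ·) →
    ∀ (s : List (Int × Int)), s.Pairwise (fun a b => a.2 ≤ b.2) →
    (∀ p ∈ s, p.2 ∈ ys) → (∀ y ∈ ys, ∃ p ∈ s, p.2 = y) →
    ∀ (i : Int) (d : PySem.Dict Int (Int × Int)),
    (∀ p ∈ s, d.get? p.2 = none) →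
    ((PySem.List.enumerate s i).foldl pvStepA d).items
      = d.items ++ pvSpine ys (fun y => (s.filter (fun p => p.2 == y)).length) i := by
  intro ys
  induction ys with
  | nil =>
      intro _ s _ hsub _ i d _
      rcases s with _ | ⟨p, t⟩
      · simp [pvSpine, PySem.List.enumerate_nil]
      · exact absurd (hsub p (by simp)) (by simp)
  | cons y ys' ih =>
      intro hys s hs hsub hocc i d hfresh
      have hys' := List.pairwise_cons.mp hys
      set blk := s.takeWhile (fun p => p.2 == y) with hblk
      set rest := s.dropWhile (fun p => p.2 == y) with hrest
      have hsplit : s = blk ++ rest := (List.takeWhile_append_dropWhile).symm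
      have hblk_all : ∀ p ∈ blk, p.2 = y := by
        intro p hp; simpa using List.mem_takeWhile_imp hp
      have hrest_pair : rest.Pairwise (fun a b => a.2 ≤ b.2) :=
        hs.sublist (List.dropWhile_sublist _)
      have hrest_ne : ∀ p ∈ rest, p.2 ≠ y := by
        rcases h : rest with _ | ⟨r0, rt⟩
        · intro p hp; simp at hp
        · have hr0' : r0.2 ≠ y := by
            have := List.head?_dropWhile_not (fun p : Int × Int => p.2 == y) s
            rw [← hrest, h] at this; simpa using this
          have hr0y : y < r0.2 := by
            have hmem : r0 ∈ s := (List.dropWhile_sublist _).mem (by rw [← hrest, h]; simp)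
            rcases List.mem_cons.mp (hsub r0 hmem) with h1 | h1
            · omega
            · exact hys'.1 _ h1
          intro p hp
          rcases List.mem_cons.mp hp with h1 | h1
          · rw [h1]; exact hr0'
          · have : r0.2 ≤ p.2 := by
              have hpw : (r0 :: rt).Pairwise (fun a b => a.2 ≤ b.2) := by
                rw [← h]; exact hrest_pair
              exact (List.pairwise_cons.mp hpw).1 p h1
            omega
      have hblk_filter : s.filter (fun p => p.2 == y) = blk := by
        rw [hsplit, List.filter_append]
        have h1 : blk.filter (fun p => p.2 == y) = blk :=
          List.filter_eq_self.mpr (fun p hp => by simpa using hblk_all p hp)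
        have h2 : rest.filter (fun p => p.2 == y) = [] :=
          List.filter_eq_nil_iff.mpr (fun p hp => by simpa using hrest_ne p hp)
        rw [h1, h2, List.append_nil]
      -- blk is nonempty: y occurs in s but not in rest
      obtain ⟨p0, hp0s, hp0y⟩ := hocc y (by simp)
      have hp0blk : p0 ∈ blk := by
        rcases List.mem_append.mp (hsplit ▸ hp0s) with h1 | h1
        · exact h1
        · exact absurd hp0y (hrest_ne p0 h1)
      -- process the block
      have hblk_fold : (PySem.List.enumerate blk i).foldl pvStepA d
          = d.insert y (i, i + blk.length - 1) := by
        rcases hb : blk with _ | ⟨q, bt⟩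
        · rw [hb] at hp0blk; simp at hp0blk
        · have hqy : q.2 = y := hblk_all q (by rw [hb]; simp)
          have hqfresh : d.get? q.2 = none :=
            hfresh q ((List.takeWhile_sublist _).mem (by rw [← hblk, hb]; simp))
          simp only [PySem.List.enumerate_cons, List.foldl_cons]
          have hqf' : d.get? y = none := hqy ▸ hqfresh
          have hstep : pvStepA d (i, q) = d.insert y (i, i) := by
            simp [pvStepA, hqy, hqf']
          rw [hstep, pvFoldlRun y i bt (i + 1) _ i
            (fun p hp => hblk_all p (by rw [hb]; simp [hp]))
            (PySem.Dict.get?_insert_self _ _ _)]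
          rcases bt with _ | ⟨b1, bt'⟩
          · simp
          · simp only [List.isEmpty_cons, if_neg Bool.false_ne_true,
              PySem.Dict.insert_insert_self, List.length_cons]
            congr 2
            push_cast
            ring
      have hrest_sub : ∀ p ∈ rest, p.2 ∈ ys' := by
        intro p hp
        rcases List.mem_cons.mp (hsub p ((List.dropWhile_sublist _).mem hp)) with h1 | h1
        · exact absurd h1 (hrest_ne p hp)
        · exact h1
      have hrest_occ : ∀ y' ∈ ys', ∃ p ∈ rest, p.2 = y' := by
        intro y' hy'
        obtain ⟨p, hps, hpy⟩ := hocc y' (by simp [hy'])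
        refine ⟨p, ?_, hpy⟩
        rcases List.mem_append.mp (hsplit ▸ hps) with h1 | h1
        · exfalso
          have := hblk_all p h1
          have := hys'.1 y' hy'
          omega
        · exact h1
      have hrest_fresh : ∀ p ∈ rest, (d.insert y (i, i + blk.length - 1)).get? p.2 = none := by
        intro p hp
        rw [PySem.Dict.get?_insert_of_ne _ _ (hrest_ne p hp)]
        exact hfresh p ((List.dropWhile_sublist _).mem hp)
      have hrec := ih hys'.2 rest hrest_pair hrest_sub hrest_occ
        (i + blk.length) _ hrest_fresh
      have hfilters : ∀ y' ∈ ys',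
          (rest.filter (fun p => p.2 == y')).length = (s.filter (fun p => p.2 == y')).length := by
        intro y' hy'
        have hyy' : y ≠ y' := by have := hys'.1 y' hy'; omega
        rw [hsplit, List.filter_append]
        have : blk.filter (fun p => p.2 == y') = [] :=
          List.filter_eq_nil_iff.mpr (fun p hp => by
            have := hblk_all p hp; simp [this]; omega)
        rw [this, List.nil_append]
      have hfreshy : d.contains y = false := by
        rw [← PySem.Dict.get?_eq_none_iff_contains]
        have := hfresh p0 hp0s
        rw [hp0y] at this
        exact this
      calc ((PySem.List.enumerate s i).foldl pvStepA d).items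
          = ((PySem.List.enumerate rest (i + blk.length)).foldl pvStepA
              (d.insert y (i, i + blk.length - 1))).items := by
            conv_lhs => rw [hsplit, PySem.List.enumerate_append, List.foldl_append, hblk_fold]
        _ = (d.items ++ [(y, i, i + (blk.length : Int) - 1)])
              ++ pvSpine ys' (fun y' => (rest.filter (fun p => p.2 == y')).length) (i + blk.length) := by
            rw [hrec, PySem.Dict.items_insert_of_not_contains _ _ hfreshy]
        _ = d.items ++ pvSpine (y :: ys')
              (fun y' => (s.filter (fun p => p.2 == y')).length) i := by
            simp only [pvSpine, hblk_filter, List.append_assoc, List.cons_append, List.nil_append]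
            rw [pvSpine_congr ys' _ _ _ hfilters]

-- B's emission fold, characterised: ids are the concatenated buckets, items are the spine
theorem pvFoldB (buckets : PySem.Dict Int (List Int)) :
    ∀ (ys : List Int), ys.Nodup →
    ∀ (ids : List Int) (d : PySem.Dict Int (Int × Int)) (pos : Int),
    (∀ y ∈ ys, d.contains y = false) →
    (ys.foldl
      (fun (acc : List Int × PySem.Dict Int (Int × Int) × Int) (year : Int) =>
        let v := buckets.getD year []
        (acc.1 ++ v,
         acc.2.1.insert year (acc.2.2, acc.2.2 + v.length - 1),
         acc.2.2 + v.length))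
      (ids, d, pos)).1 = ids ++ ys.flatMap (fun y => buckets.getD y [])
    ∧ (ys.foldl
      (fun (acc : List Int × PySem.Dict Int (Int × Int) × Int) (year : Int) =>
        let v := buckets.getD year []
        (acc.1 ++ v,
         acc.2.1.insert year (acc.2.2, acc.2.2 + v.length - 1),
         acc.2.2 + v.length))
      (ids, d, pos)).2.1.items
        = d.items ++ pvSpine ys (fun y => (buckets.getD y []).length) pos := by
  intro ys
  induction ys with
  | nil => intro _ ids d pos _; simp [pvSpine]
  | cons y t ih =>
      intro hnd ids d pos hfresh
      have hnd' := List.nodup_cons.mp hnd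
      have hfresh' : ∀ z ∈ t, (d.insert y (pos, pos + (buckets.getD y []).length - 1)).contains z = false := by
        intro z hz
        have hzy : z ≠ y := fun h => hnd'.1 (h ▸ hz)
        rw [PySem.Dict.contains_insert]
        simp [hzy, hfresh z (by simp [hz])]
      obtain ⟨ih1, ih2⟩ := ih hnd'.2 (ids ++ buckets.getD y [])
        (d.insert y (pos, pos + (buckets.getD y []).length - 1))
        (pos + (buckets.getD y []).length) hfresh'
      constructor
      · simp only [List.foldl_cons]
        rw [ih1, List.flatMap_cons, List.append_assoc]
      · simp only [List.foldl_cons]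
        rw [ih2, PySem.Dict.items_insert_of_not_contains _ _ (hfresh y (by simp))]
        simp [pvSpine, List.append_assoc]

-- the buckets dict: lookup is the per-year filter, keys are the distinct years
theorem pvBuckets_getD (l : List (Int × Int)) (y : Int) :
    (l.foldl (fun d p => d.modify p.2 [] (fun v => v ++ [p.1])) PySem.Dict.empty).getD y []
      = (l.filter (fun p => p.2 == y)).map (fun p => p.1) := by
  have hfold : l.foldl (fun d p => d.modify p.2 [] (fun v => v ++ [p.1])) PySem.Dict.empty
      = (l.map (fun p => (p.2, p.1))).foldl
          (fun d q => d.modify q.1 [] (fun v => v ++ [q.2])) PySem.Dict.empty := by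
    rw [List.foldl_map]
  rw [hfold, PySem.Dict.getD_foldl_modify_append, PySem.Dict.getD_empty, List.nil_append,
    List.filter_map, List.map_map]
  simp [Function.comp_def]

-- ===== VERDICT (by name: the statement is the Claim_ definition above) =====
theorem index_graduation_year_spec : Claim_equal_index_graduation_year := by
  unfold Claim_equal_index_graduation_year Spec_index_graduation_year
  intro l _
  set s := PySem.List.sorted l (fun x => x.2) with hsdef
  set buckets : PySem.Dict Int (List Int) :=
    l.foldl (fun d p => d.modify p.2 [] (fun v => v ++ [p.1])) PySem.Dict.empty with hbdef
  set ys := PySem.List.sorted buckets.keys (fun x => x) false with hysdef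
  -- facts about ys
  have hkeys : buckets.keys = PySem.Set.ofList (l.map (fun p => p.2)) := by
    rw [hbdef, PySem.Dict.keys_foldl_modify_key]
    simp [PySem.Set.update, PySem.Set.ofList_eq_foldl]
  have hys_lt : ys.Pairwise (· < ·) := by
    rw [hysdef, hkeys]
    exact PySem.List.sorted_ofList_pairwise_lt _
  have hys_nodup : ys.Nodup := hys_lt.imp (fun h => ne_of_lt h)
  have hys_mem : ∀ y : Int, y ∈ ys ↔ y ∈ l.map (fun p => p.2) := by
    intro y
    rw [hysdef, PySem.List.mem_sorted, hkeys, PySem.Set.mem_ofList]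
  -- facts about s
  have hs_pair : s.Pairwise (fun a b => a.2 ≤ b.2) := PySem.List.sorted_pairwise l _
  have hs_mem : ∀ p, p ∈ s ↔ p ∈ l := fun p => PySem.List.mem_sorted l _ false p
  have hs_sub : ∀ p ∈ s, p.2 ∈ ys := by
    intro p hp
    rw [hys_mem]
    exact List.mem_map.mpr ⟨p, (hs_mem p).mp hp, rfl⟩
  have hs_occ : ∀ y ∈ ys, ∃ p ∈ s, p.2 = y := by
    intro y hy
    obtain ⟨p, hp, hpy⟩ := List.mem_map.mp ((hys_mem y).mp hy)
    exact ⟨p, (hs_mem p).mpr hp, hpy⟩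
  have hstab : ∀ y : Int, s.filter (fun p => p.2 == y) = l.filter (fun p => p.2 == y) :=
    fun y => pvSorted_filter l y
  have hbget : ∀ y : Int, buckets.getD y [] = (s.filter (fun p => p.2 == y)).map (fun p => p.1) := by
    intro y
    rw [hbdef, pvBuckets_getD, ← hstab]
  obtain ⟨hB1, hB2⟩ := pvFoldB buckets ys hys_nodup [] PySem.Dict.empty 0
    (fun y _ => PySem.Dict.contains_empty y)
  have hdecomp := pvDecomp ys hys_lt s hs_pair hs_sub
  -- both sides, written out (definitional unfoldings of the two ports)
  have hAval : index_graduation_year l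
      = (s.map (fun item => item.1),
         ((PySem.List.enumerate s 0).foldl pvStepA PySem.Dict.empty).items) := rfl
  have hBval : index_graduation_year_alt l
      = ((ys.foldl
            (fun (acc : List Int × PySem.Dict Int (Int × Int) × Int) (year : Int) =>
              let v := buckets.getD year []
              (acc.1 ++ v,
               acc.2.1.insert year (acc.2.2, acc.2.2 + v.length - 1),
               acc.2.2 + v.length))
            ([], PySem.Dict.empty, 0)).1,
         (ys.foldl
            (fun (acc : List Int × PySem.Dict Int (Int × Int) × Int) (year : Int) =>
              let v := buckets.getD year []
              (acc.1 ++ v,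
               acc.2.1.insert year (acc.2.2, acc.2.2 + v.length - 1),
               acc.2.2 + v.length))
            ([], PySem.Dict.empty, 0)).2.1.items) := rfl
  rw [hAval, hBval, hB1, hB2]
  have hemp : (PySem.Dict.empty : PySem.Dict Int (Int × Int)).items = [] := rfl
  rw [hemp, List.nil_append, List.nil_append]
  refine Prod.ext ?_ ?_
  · -- the id lists
    show s.map (fun item => item.1) = _
    conv_lhs => rw [hdecomp]
    rw [List.map_flatMap]
    exact List.flatMap_congr (fun y hy => by rw [hbget y])
  · -- the index items
    show ((PySem.List.enumerate s 0).foldl pvStepA PySem.Dict.empty).items = _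
    rw [pvFoldlSpine ys hys_lt s hs_pair hs_sub hs_occ 0 PySem.Dict.empty
      (fun p _ => PySem.Dict.get?_empty _), hemp, List.nil_append]
    exact pvSpine_congr ys _ _ 0 (fun y _ => by rw [hbget y, List.length_map])
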